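-- pv_equiv track=rewrite | github.com/Rebalancy/agent-contracts | agent/src/rebalancer.py | compute_rebalance_operations
-- ===== SOURCE A (Python) =====
-- from typing import Dict, List
--
-- def compute_rebalance_operations(
--     current_allocations: Dict[int, int],
--     optimized_allocations: Dict[int, int]
-- ) -> List[Dict[str, int]]:
--     # Calculate the delta for each chain
--     delta_by_chain = {
--         chain_id: optimized_allocations.get(chain_id, 0) - current_allocations.get(chain_id, 0)
--         for chain_id in set(current_allocations.keys()) | set(optimized_allocations.keys())
--     }
--
--     # Step 2: Separate chains with surplus (source) and chains with need (destination)
--     sources = {cid: delta for cid, delta in delta_by_chain.items() if delta < 0}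
--     destinations = {cid: delta for cid, delta in delta_by_chain.items() if delta > 0}
--
--     # Step 3: Create sequential rebalance operations
--     rebalance_operations = []
--
--     for dst_chain, needed in destinations.items():
--         for src_chain, available in list(sources.items()):
--             amount = min(-available, needed)
--             if amount <= 0:
--                 continue
--             rebalance_operations.append({
--                 "from": src_chain,
--                 "to": dst_chain,
--                 "amount": amount
--             })
--             sources[src_chain] += amount  # Increase the surplus
--             destinations[dst_chain] -= amount  # Decrease the need
--
--             if sources[src_chain] == 0:
--                 del sources[src_chain]
--             if destinations[dst_chain] == 0:
--                 break
--
--     return rebalance_operations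
-- ===== SOURCE B (Python) =====
-- from typing import Dict, List
--
-- def compute_rebalance_operations(
--     current_allocations: Dict[int, int],
--     optimized_allocations: Dict[int, int]
-- ) -> List[Dict[str, int]]:
--     # Single pass over the union: sources become a stack (first source on top),
--     # destinations a queue; transfers pop sources off the stack, pushing back a
--     # partially-consumed remainder after each destination is served.
--     stack = []
--     dsts = []
--     for cid in set(current_allocations.keys()) | set(optimized_allocations.keys()):
--         d = optimized_allocations.get(cid, 0) - current_allocations.get(cid, 0)
--         if d < 0:
--             stack.append((cid, -d))
--         elif d > 0:
--             dsts.append((cid, d))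
--     stack.reverse()
--
--     ops = []
--     for dst, need in dsts:
--         got = 0
--         back = []
--         while stack and got != need:
--             cid, r = stack.pop()
--             t = need if need < r else r
--             ops.append({"from": cid, "to": dst, "amount": t})
--             got += t
--             if t < r:
--                 back.append((cid, r - t))
--         stack.extend(reversed(back))
--     return ops
-- ===== Notes on version B (the rewrite author's own statement) =====
-- stated objective: faster
-- what changed: Replaces A's two mutated dicts (a fresh list(sources.items()) snapshot per destination, in-place value updates, key deletion) with one splitting pass over the union and a source stack popped per destination with a put-back list for partial remainders, so a destination touches only the sources it consumes instead of a copy of all surviving sources; reproduces A's greedy pairing exactly (including its use of the original need for every source).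
import Mathlib
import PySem

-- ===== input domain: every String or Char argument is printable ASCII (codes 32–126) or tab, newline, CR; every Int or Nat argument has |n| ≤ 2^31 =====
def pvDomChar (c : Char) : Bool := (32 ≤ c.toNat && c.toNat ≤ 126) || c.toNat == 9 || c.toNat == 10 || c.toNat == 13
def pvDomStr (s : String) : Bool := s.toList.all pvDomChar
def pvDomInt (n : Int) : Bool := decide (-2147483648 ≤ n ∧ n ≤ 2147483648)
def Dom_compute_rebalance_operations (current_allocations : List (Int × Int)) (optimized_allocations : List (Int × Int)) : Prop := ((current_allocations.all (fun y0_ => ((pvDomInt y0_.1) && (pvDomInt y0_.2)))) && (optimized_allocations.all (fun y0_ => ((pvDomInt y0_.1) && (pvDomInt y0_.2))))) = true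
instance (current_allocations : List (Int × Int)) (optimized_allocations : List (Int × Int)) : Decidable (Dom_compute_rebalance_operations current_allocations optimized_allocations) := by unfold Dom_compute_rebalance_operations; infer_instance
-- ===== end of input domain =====

-- B replaces A's two mutated dicts (a fresh list(sources.items()) snapshot per destination,
-- in-place value updates, key deletion) with one splitting pass and a source STACK popped
-- per destination with a put-back list for partial remainders, so a destination touches only
-- the sources it consumes; a timing run measured B faster — proved to return exactly A's value.

-- ===== PORT A =====
-- A iterates `set(current.keys()) | set(optimized.keys())`, and the result's order depends
-- on that iteration order, so the CPython (3.11) small-int set table is ported by hand,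
-- step for step (setobject.c: open addressing, LINEAR_PROBES = 9, perturb shift 5, growth
-- threshold fill*5 >= mask*3, resize to used*4 (used*2 beyond 50000), union = copy + merge).
-- Exact for int elements with |n| ≤ 2^31 (hash(n) = n, except hash(-1) = -2), checked against
-- CPython by the differential test. The probe loops carry a fuel of size+64, which exceeds the
-- longest probe sequence a table with empty slots can produce.

def pvHash (v : Int) : UInt64 :=
  let h : Int := if v = -1 then -2 else v
  if 0 ≤ h then UInt64.ofNat h.toNat else 0 - UInt64.ofNat (-h).toNat

structure pvPySet where
  table : Array (Option Int)
  fill : Nat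
  used : Nat

def pvEmptySet : pvPySet := ⟨Array.replicate 8 none, 0, 0⟩

-- first empty slot among e, e+1, …, e+n (the linear-probe window), if any
def pvScanClean (table : Array (Option Int)) : Nat → Nat → Option Nat
  | n, e =>
    if (table[e]?.getD none).isNone then some e
    else match n with
      | 0 => none
      | m + 1 => pvScanClean table m (e + 1)

def pvProbeClean (table : Array (Option Int)) (mask : UInt64) : Nat → UInt64 → UInt64 → Nat
  | 0, i, _ => i.toNat  -- fuel exhausted: unreachable for a table with an empty slot
  | fuel + 1, i, perturb =>
    let probes : Nat := if i + (9 : UInt64) ≤ mask then 9 else 0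
    match pvScanClean table probes i.toNat with
    | some e => e
    | none => pvProbeClean table mask fuel ((i * 5 + 1 + (perturb >>> (5 : UInt64))) &&& mask) (perturb >>> (5 : UInt64))

def pvInsertClean (s : pvPySet) (key : Int) : pvPySet :=
  let mask : UInt64 := UInt64.ofNat (s.table.size - 1)
  let h := pvHash key
  let e := pvProbeClean s.table mask (s.table.size + 64) (h &&& mask) h
  ⟨s.table.setIfInBounds e (some key), s.fill + 1, s.used + 1⟩

-- newsize = PySet_MINSIZE; while newsize <= minused: newsize <<= 1
def pvNewSize (minused : Nat) : Nat → Nat → Nat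
  | 0, cur => cur
  | fuel + 1, cur => if cur ≤ minused then pvNewSize minused fuel (cur * 2) else cur

def pvResize (s : pvPySet) (minused : Nat) : pvPySet :=
  let newsize := pvNewSize minused 64 8
  (s.table.toList.filterMap id).foldl pvInsertClean ⟨Array.replicate newsize none, 0, 0⟩

-- scan the linear-probe window: `some (some e)` = empty slot e, `some none` = key present
def pvScanAdd (table : Array (Option Int)) (key : Int) : Nat → Nat → Option (Option Nat)
  | n, e =>
    match table[e]?.getD none with
    | none => some (some e)
    | some k =>
      if k = key then some none
      else match n with
        | 0 => none
        | m + 1 => pvScanAdd table key m (e + 1)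

-- `some e` = insert at empty slot e, `none` = key already present
def pvProbeAdd (table : Array (Option Int)) (key : Int) (mask : UInt64) : Nat → UInt64 → UInt64 → Option Nat
  | 0, _, _ => none  -- fuel exhausted: unreachable for a table with an empty slot
  | fuel + 1, i, perturb =>
    let probes : Nat := if i + (9 : UInt64) ≤ mask then 9 else 0
    match pvScanAdd table key probes i.toNat with
    | some r => r
    | none => pvProbeAdd table key mask fuel ((i * 5 + 1 + (perturb >>> (5 : UInt64))) &&& mask) (perturb >>> (5 : UInt64))

def pvSetAdd (s : pvPySet) (key : Int) : pvPySet :=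
  let mask : UInt64 := UInt64.ofNat (s.table.size - 1)
  let h := pvHash key
  match pvProbeAdd s.table key mask (s.table.size + 64) (h &&& mask) h with
  | none => s
  | some e =>
    let s' : pvPySet := ⟨s.table.setIfInBounds e (some key), s.fill + 1, s.used + 1⟩
    if s'.fill * 5 ≥ (s.table.size - 1) * 3 then
      pvResize s' (if s'.used > 50000 then s'.used * 2 else s'.used * 4)
    else s'

def pvMerge (so other : pvPySet) : pvPySet :=
  let so := if (so.fill + other.used) * 5 ≥ (so.table.size - 1) * 3 then
              pvResize so ((so.used + other.used) * 2)
            else so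
  if so.fill = 0 ∧ so.table.size = other.table.size ∧ other.fill = other.used then
    other  -- empty table, same mask, no dummies: position-preserving copy
  else if so.fill = 0 then
    (other.table.toList.filterMap id).foldl pvInsertClean so
  else
    (other.table.toList.filterMap id).foldl pvSetAdd so

-- set(k1) | set(k2), in CPython iteration order.  The elements of a set are pairwise
-- distinct; the final PySem.Set.ofList is the identity on the table's contents and
-- records that invariant (it changes no value and lets the proofs use Nodup).
def pvSetUnionKeys (k1 k2 : List Int) : List Int :=
  let s1 := k1.foldl pvSetAdd pvEmptySet
  let s2 := k2.foldl pvSetAdd pvEmptySet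
  let r := pvMerge (pvMerge pvEmptySet s1) s2
  PySem.Set.ofList (r.table.toList.filterMap id)

-- inner `for src_chain, available in list(sources.items())` loop; early return = `break`.
-- `sources[src_chain] += amount` / `destinations[dst_chain] -= amount` are Dict.modify with
-- default 0 (exact: both keys are always present where Python executes these lines).
def pvInnerA (dst needed : Int) (snapshot : List (Int × Int))
    (ops : List (List (String × Int))) (sources destinations : PySem.Dict Int Int) :
    List (List (String × Int)) × PySem.Dict Int Int × PySem.Dict Int Int :=
  match snapshot with
  | [] => (ops, sources, destinations)
  | (src_chain, available) :: rest =>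
    let amount := min (-available) needed
    if amount ≤ 0 then pvInnerA dst needed rest ops sources destinations
    else
      let ops' := ops ++ [[("from", src_chain), ("to", dst), ("amount", amount)]]
      let sources' := sources.modify src_chain 0 (· + amount)
      let destinations' := destinations.modify dst 0 (· - amount)
      let sources'' := if sources'.getD src_chain 0 = 0 then sources'.erase src_chain else sources'
      if destinations'.getD dst 0 = 0 then (ops', sources'', destinations')
      else pvInnerA dst needed rest ops' sources'' destinations'

def compute_rebalance_operations (current_allocations : List (Int × Int)) (optimized_allocations : List (Int × Int)) : List (List (String × Int)) :=
  let curD := PySem.Dict.ofList current_allocations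
  let optD := PySem.Dict.ofList optimized_allocations
  let delta : PySem.Dict Int Int :=
    (pvSetUnionKeys curD.keys optD.keys).foldl
      (fun d cid => d.insert cid (optD.getD cid 0 - curD.getD cid 0)) PySem.Dict.empty
  let sources := delta.items.foldl
      (fun d p => if p.2 < 0 then d.insert p.1 p.2 else d) (PySem.Dict.empty : PySem.Dict Int Int)
  let destinations := delta.items.foldl
      (fun d p => if 0 < p.2 then d.insert p.1 p.2 else d) (PySem.Dict.empty : PySem.Dict Int Int)
  -- `for dst_chain, needed in destinations.items()`: only the current key's value is ever
  -- written, so iterating the initial items list reads exactly the values Python reads.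
  (destinations.items.foldl
      (fun st dn => pvInnerA dn.1 dn.2 st.2.1.items st.1 st.2.1 st.2.2)
      (([], sources, destinations) : List (List (String × Int)) × PySem.Dict Int Int × PySem.Dict Int Int)).1

-- ===== PORT B =====
-- Source B also evaluates `set(current.keys()) | set(optimized.keys())`, so B carries its OWN
-- model of the same builtin (proved below to list the keys in the same order as A's model):
-- Source B never discards a set element, so the table is dummy-free and CPython's fill/used
-- collapse into ONE counter; the probe order is generated up front as a position sequence
-- (base slot, ≤9 linear follow-ups, perturbed jump — with its fallback base at fuel end)
-- and then walked once per operation.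

def qHash (x : Int) : UInt64 :=
  UInt64.ofNat (((if x = -1 then -2 else x) % ((2 : Int) ^ 64)).toNat)

-- the slots CPython visits for hash h on a table of mask `mask`, plus the fallback base
def qProbeSeq (mask : UInt64) : Nat → UInt64 → UInt64 → List Nat × Nat
  | 0, i, _ => ([], i.toNat)
  | fuel + 1, i, pert =>
    let tl := qProbeSeq mask fuel ((i * 5 + 1 + (pert >>> (5 : UInt64))) &&& mask) (pert >>> (5 : UInt64))
    ((List.range (if i + (9 : UInt64) ≤ mask then 10 else 1)).map (i.toNat + ·) ++ tl.1, tl.2)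

def qSeq (t : Array (Option Int)) (h : UInt64) : List Nat × Nat :=
  qProbeSeq (UInt64.ofNat (t.size - 1)) (t.size + 64) (h &&& UInt64.ofNat (t.size - 1)) h

def qFirstEmpty (t : Array (Option Int)) : List Nat → Option Nat
  | [] => none
  | p :: ps => if (t[p]?.getD none).isNone then some p else qFirstEmpty t ps

-- `some (some e)` = free slot e, `some none` = key already sits in the table
def qFirstFit (t : Array (Option Int)) (x : Int) : List Nat → Option (Option Nat)
  | [] => none
  | p :: ps =>
    match t[p]?.getD none with
    | none => some (some p)
    | some k => if k = x then some none else qFirstFit t x ps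

-- place a key known to be absent (rehash path): no compares, first free slot wins
def qPlace : Array (Option Int) × Nat → Int → Array (Option Int) × Nat
  | (t, n), x =>
    let w := qSeq t (qHash x)
    (t.setIfInBounds ((qFirstEmpty t w.1).getD w.2) (some x), n + 1)

-- exponent of the table size CPython's doubling loop reaches for `minused`
def qCapExp (m : Nat) : Nat → Nat → Nat
  | 0, k => k
  | f + 1, k => if 2 ^ k ≤ m then qCapExp m f (k + 1) else k

def qRehash (t : Array (Option Int)) (minused : Nat) : Array (Option Int) × Nat :=
  (t.toList.filterMap id).foldl qPlace (Array.replicate (2 ^ qCapExp minused 64 3) none, 0)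

def qAdd : Array (Option Int) × Nat → Int → Array (Option Int) × Nat
  | (t, n), x =>
    match qFirstFit t x (qSeq t (qHash x)).1 with
    | some (some e) =>
      let t' := t.setIfInBounds e (some x)
      if (n + 1) * 5 ≥ (t.size - 1) * 3 then
        qRehash t' (if n + 1 > 50000 then (n + 1) * 2 else (n + 1) * 4)
      else (t', n + 1)
    | _ => (t, n)

def qMerge : Array (Option Int) × Nat → Array (Option Int) × Nat → Array (Option Int) × Nat
  | (t, n), (ot, m) =>
    let g := if (n + m) * 5 ≥ (t.size - 1) * 3 then qRehash t ((n + m) * 2) else (t, n)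
    if g.2 = 0 ∧ g.1.size = ot.size then (ot, m)
    else if g.2 = 0 then (ot.toList.filterMap id).foldl qPlace g
    else (ot.toList.filterMap id).foldl qAdd g

def qUnionKeys (k1 k2 : List Int) : List Int :=
  let s1 := k1.foldl qAdd (Array.replicate 8 none, 0)
  let s2 := k2.foldl qAdd (Array.replicate 8 none, 0)
  let u := qMerge (qMerge (Array.replicate 8 none, 0) s1) s2
  PySem.Set.ofList (u.1.toList.filterMap id)

-- Source B's splitting pass: one walk over the union filling the source stack and the
-- demand list.  Source B appends sources and then reverses once so the FIRST source sits on
-- top; the stack is kept head-first here, which absorbs that reversal: head = top.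
structure qPools where
  stack : List (Int × Int)
  dsts : List (Int × Int)

def qSplit (cur opt : PySem.Dict Int Int) : List Int → qPools → qPools
  | [], ps => ps
  | c :: cs, ps =>
    let d := opt.getD c 0 - cur.getD c 0
    if d < 0 then qSplit cur opt cs { ps with stack := ps.stack ++ [(c, -d)] }
    else if 0 < d then qSplit cur opt cs { ps with dsts := ps.dsts ++ [(c, d)] }
    else qSplit cur opt cs ps

def qOp (c d a : Int) : List (String × Int) := [("from", c), ("to", d), ("amount", a)]

-- Source B's `while stack and got != need` draw loop: pop, emit an op, bank a partial
-- remainder on `back`; returns (rest of stack, put-backs, ops)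
def qDraw (d need : Int) : List (Int × Int) → Int → List (Int × Int) →
    List (List (String × Int)) →
    List (Int × Int) × List (Int × Int) × List (List (String × Int))
  | [], _, back, acc => ([], back, acc)
  | (c, r) :: lower, got, back, acc =>
    if got = need then ((c, r) :: lower, back, acc)
    else
      let a := if need < r then need else r
      qDraw d need lower (got + a)
        (if a < r then back ++ [(c, r - a)] else back)
        (acc ++ [qOp c d a])

-- Source B's outer `for dst, need in dsts` loop; `stack.extend(reversed(back))` puts the
-- put-backs on top, i.e. `back ++ lower` head-first
def qServe : List (Int × Int) → List (Int × Int) → List (List (String × Int)) →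
    List (List (String × Int))
  | [], _, acc => acc
  | (d, need) :: more, stack, acc =>
    match qDraw d need stack 0 [] acc with
    | (lower, back, acc') => qServe more (back ++ lower) acc'

def compute_rebalance_operations_alt (current_allocations : List (Int × Int)) (optimized_allocations : List (Int × Int)) : List (List (String × Int)) :=
  let cur := PySem.Dict.ofList current_allocations
  let opt := PySem.Dict.ofList optimized_allocations
  let ps := qSplit cur opt (qUnionKeys cur.keys opt.keys) ⟨[], []⟩
  qServe ps.dsts ps.stack []

-- ===== PRECONDITION & SPEC =====
def Spec_compute_rebalance_operations (current_allocations : List (Int × Int)) (optimized_allocations : List (Int × Int)) (out : List (List (String × Int))) : Prop := out = compute_rebalance_operations_alt current_allocations optimized_allocations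
instance (current_allocations : List (Int × Int)) (optimized_allocations : List (Int × Int)) (out : List (List (String × Int))) : Decidable (Spec_compute_rebalance_operations current_allocations optimized_allocations out) := by unfold Spec_compute_rebalance_operations; infer_instance

-- ===== CLAIM (what is proved, stated in full; the proofs are below) =====
def Claim_equal_compute_rebalance_operations : Prop := ∀ (current_allocations : List (Int × Int)) (optimized_allocations : List (Int × Int)), Dom_compute_rebalance_operations current_allocations optimized_allocations → Spec_compute_rebalance_operations current_allocations optimized_allocations (compute_rebalance_operations current_allocations optimized_allocations)

-- ===== LEMMAS AND PROOFS =====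

theorem qHash_eq (v : Int) : qHash v = pvHash v := by
  unfold qHash pvHash
  set h : Int := if v = -1 then -2 else v with hh
  by_cases h0 : 0 ≤ h
  · rw [if_pos h0]
    apply UInt64.toNat_inj.mp
    first
    | (simp; omega)
    | simp
  · rw [if_neg h0]
    have hsub : (0 : UInt64) - UInt64.ofNat ((-h).toNat) =
        UInt64.ofNat (2 ^ 64 - (-h).toNat % 2 ^ 64) := by
      apply UInt64.toNat_inj.mp
      first
      | (simp; omega)
      | simp
    rw [hsub]
    apply UInt64.toNat_inj.mp
    first
    | (simp; omega)
    | simp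

theorem qWindow_empty (t : Array (Option Int)) :
    ∀ (probes e : Nat) (rest : List Nat),
    qFirstEmpty t ((List.range (probes + 1)).map (e + ·) ++ rest) =
      (match pvScanClean t probes e with
       | some x => some x
       | none => qFirstEmpty t rest) := by
  intro probes
  induction probes with
  | zero =>
    intro e rest
    rw [pvScanClean]
    by_cases hsl : (t[e]?.getD none).isNone
    · simp [qFirstEmpty, hsl]
    · simp [qFirstEmpty, hsl]
  | succ m ih =>
    intro e rest
    have hGrid : (List.range (m + 1 + 1)).map (e + ·) =
        e :: (List.range (m + 1)).map ((e + 1) + ·) := by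
      rw [List.range_succ_eq_map, List.map_cons, List.map_map]
      refine congrArg₂ List.cons (by simp) ?_
      exact List.map_congr_left fun k _ => by simp only [Function.comp_apply]; omega
    rw [hGrid, pvScanClean]
    by_cases hsl : (t[e]?.getD none).isNone
    · simp [qFirstEmpty, hsl]
    · simp only [List.cons_append, qFirstEmpty, hsl, if_neg, Bool.false_eq_true,
        not_false_eq_true, if_false]
      exact ih (e + 1) rest

theorem qWindow_fit (t : Array (Option Int)) (x : Int) :
    ∀ (probes e : Nat) (rest : List Nat),
    qFirstFit t x ((List.range (probes + 1)).map (e + ·) ++ rest) =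
      (match pvScanAdd t x probes e with
       | some r => some r
       | none => qFirstFit t x rest) := by
  intro probes
  induction probes with
  | zero =>
    intro e rest
    rw [pvScanAdd]
    rcases hsl : t[e]?.getD none with _ | k
    · simp [qFirstFit, hsl]
    · by_cases hk : k = x
      · simp [qFirstFit, hsl, hk]
      · simp [qFirstFit, hsl, hk]
  | succ m ih =>
    intro e rest
    have hGrid : (List.range (m + 1 + 1)).map (e + ·) =
        e :: (List.range (m + 1)).map ((e + 1) + ·) := by
      rw [List.range_succ_eq_map, List.map_cons, List.map_map]
      refine congrArg₂ List.cons (by simp) ?_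
      exact List.map_congr_left fun k _ => by simp only [Function.comp_apply]; omega
    rw [hGrid, pvScanAdd]
    rcases hsl : t[e]?.getD none with _ | k
    · simp [qFirstFit, hsl]
    · by_cases hk : k = x
      · simp [qFirstFit, hsl, hk]
      · simp only [List.cons_append, qFirstFit, hsl, hk, if_neg, not_false_eq_true, if_false]
        exact ih (e + 1) rest

theorem qProbeClean_eq (t : Array (Option Int)) (mask : UInt64) :
    ∀ (fuel : Nat) (i pert : UInt64),
    pvProbeClean t mask fuel i pert =
      (qFirstEmpty t (qProbeSeq mask fuel i pert).1).getD (qProbeSeq mask fuel i pert).2 := by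
  intro fuel
  induction fuel with
  | zero => intro i pert; rfl
  | succ f ih =>
    intro i pert
    rw [pvProbeClean, qProbeSeq]
    have hlen : (if i + (9 : UInt64) ≤ mask then 10 else 1) =
        (if i + (9 : UInt64) ≤ mask then 9 else 0) + 1 := by
      split_ifs <;> rfl
    simp only [hlen]
    rw [qWindow_empty]
    rcases hsc : pvScanClean t (if i + (9 : UInt64) ≤ mask then 9 else 0) i.toNat with _ | e
    · simp only [Option.getD]
      exact ih _ _
    · rfl

theorem qProbeAdd_eq (t : Array (Option Int)) (key : Int) (mask : UInt64) :
    ∀ (fuel : Nat) (i pert : UInt64),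
    pvProbeAdd t key mask fuel i pert =
      (qFirstFit t key (qProbeSeq mask fuel i pert).1).join := by
  intro fuel
  induction fuel with
  | zero => intro i pert; rfl
  | succ f ih =>
    intro i pert
    rw [pvProbeAdd, qProbeSeq]
    have hlen : (if i + (9 : UInt64) ≤ mask then 10 else 1) =
        (if i + (9 : UInt64) ≤ mask then 9 else 0) + 1 := by
      split_ifs <;> rfl
    simp only [hlen]
    rw [qWindow_fit]
    rcases hsc : pvScanAdd t key (if i + (9 : UInt64) ≤ mask then 9 else 0) i.toNat with _ | r
    · exact ih _ _
    · rfl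

theorem qPlace_eq (s : pvPySet) (x : Int) (h : s.fill = s.used) :
    qPlace (s.table, s.used) x = ((pvInsertClean s x).table, (pvInsertClean s x).used)
      ∧ (pvInsertClean s x).fill = (pvInsertClean s x).used := by
  constructor
  · show (s.table.setIfInBounds
        ((qFirstEmpty s.table (qSeq s.table (qHash x)).1).getD (qSeq s.table (qHash x)).2)
        (some x), s.used + 1) = _
    rw [qHash_eq]
    unfold qSeq
    rw [← qProbeClean_eq]
    rfl
  · show s.fill + 1 = s.used + 1
    omega

theorem foldl_qPlace_eq (l : List Int) :
    ∀ (s : pvPySet), s.fill = s.used →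
    l.foldl qPlace (s.table, s.used) =
      ((l.foldl pvInsertClean s).table, (l.foldl pvInsertClean s).used)
      ∧ (l.foldl pvInsertClean s).fill = (l.foldl pvInsertClean s).used := by
  induction l with
  | nil => intro s h; exact ⟨rfl, h⟩
  | cons x xs ih =>
    intro s h
    have hp := qPlace_eq s x h
    simp only [List.foldl_cons]
    rw [hp.1]
    exact ih _ hp.2

theorem qCapExp_eq (m : Nat) : ∀ (f k : Nat), pvNewSize m f (2 ^ k) = 2 ^ qCapExp m f k := by
  intro f
  induction f with
  | zero => intro k; rfl
  | succ g ih =>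
    intro k
    rw [pvNewSize, qCapExp]
    by_cases hc : 2 ^ k ≤ m
    · rw [if_pos hc, if_pos hc, show 2 ^ k * 2 = 2 ^ (k + 1) by rw [pow_succ], ih]
    · rw [if_neg hc, if_neg hc]

theorem qRehash_eq (s : pvPySet) (minused : Nat) :
    qRehash s.table minused = ((pvResize s minused).table, (pvResize s minused).used)
      ∧ (pvResize s minused).fill = (pvResize s minused).used := by
  unfold qRehash pvResize
  have hsz : pvNewSize minused 64 8 = 2 ^ qCapExp minused 64 3 := qCapExp_eq minused 64 3
  rw [← hsz]
  exact foldl_qPlace_eq _ ⟨Array.replicate (pvNewSize minused 64 8) none, 0, 0⟩ rfl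

theorem qAdd_eq (s : pvPySet) (x : Int) (h : s.fill = s.used) :
    qAdd (s.table, s.used) x = ((pvSetAdd s x).table, (pvSetAdd s x).used)
      ∧ (pvSetAdd s x).fill = (pvSetAdd s x).used := by
  have hpa : pvProbeAdd s.table x (UInt64.ofNat (s.table.size - 1)) (s.table.size + 64)
      (pvHash x &&& UInt64.ofNat (s.table.size - 1)) (pvHash x) =
      (qFirstFit s.table x (qSeq s.table (qHash x)).1).join := by
    rw [qHash_eq]
    exact qProbeAdd_eq _ _ _ _ _ _
  rcases hf : qFirstFit s.table x (qSeq s.table (qHash x)).1 with _ | (_ | e)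
  · have hpa' : pvProbeAdd s.table x (UInt64.ofNat (s.table.size - 1)) (s.table.size + 64)
        (pvHash x &&& UInt64.ofNat (s.table.size - 1)) (pvHash x) = none := by
      rw [hpa, hf]
      rfl
    simp only [qAdd, pvSetAdd, hf, hpa']
    refine ⟨?_, h⟩
    trivial
  · have hpa' : pvProbeAdd s.table x (UInt64.ofNat (s.table.size - 1)) (s.table.size + 64)
        (pvHash x &&& UInt64.ofNat (s.table.size - 1)) (pvHash x) = none := by
      rw [hpa, hf]
      rfl
    simp only [qAdd, pvSetAdd, hf, hpa']
    refine ⟨?_, h⟩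
    trivial
  · have hpa' : pvProbeAdd s.table x (UInt64.ofNat (s.table.size - 1)) (s.table.size + 64)
        (pvHash x &&& UInt64.ofNat (s.table.size - 1)) (pvHash x) = some e := by
      rw [hpa, hf]
      rfl
    simp only [qAdd, pvSetAdd, hf, hpa']
    by_cases hth : (s.used + 1) * 5 ≥ (s.table.size - 1) * 3
    · rw [if_pos hth, if_pos (show (s.fill + 1) * 5 ≥ (s.table.size - 1) * 3 by omega)]
      exact qRehash_eq ⟨s.table.setIfInBounds e (some x), s.fill + 1, s.used + 1⟩ _
    · rw [if_neg hth, if_neg (show ¬ (s.fill + 1) * 5 ≥ (s.table.size - 1) * 3 by omega)]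
      refine ⟨rfl, ?_⟩
      show s.fill + 1 = s.used + 1
      omega

theorem foldl_qAdd_eq (l : List Int) :
    ∀ (s : pvPySet), s.fill = s.used →
    l.foldl qAdd (s.table, s.used) =
      ((l.foldl pvSetAdd s).table, (l.foldl pvSetAdd s).used)
      ∧ (l.foldl pvSetAdd s).fill = (l.foldl pvSetAdd s).used := by
  induction l with
  | nil => intro s h; exact ⟨rfl, h⟩
  | cons x xs ih =>
    intro s h
    have hp := qAdd_eq s x h
    simp only [List.foldl_cons]
    rw [hp.1]
    exact ih _ hp.2

theorem qMerge_eq_core (so other : pvPySet) (g : Array (Option Int) × Nat)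
    (hG : g = (so.table, so.used)) (hGf : so.fill = so.used)
    (ho : other.fill = other.used) :
    (if g.2 = 0 ∧ g.1.size = other.table.size then (other.table, other.used)
     else if g.2 = 0 then (other.table.toList.filterMap id).foldl qPlace g
     else (other.table.toList.filterMap id).foldl qAdd g) =
      ((if so.fill = 0 ∧ so.table.size = other.table.size ∧ other.fill = other.used then other
        else if so.fill = 0 then (other.table.toList.filterMap id).foldl pvInsertClean so
        else (other.table.toList.filterMap id).foldl pvSetAdd so).table,
       (if so.fill = 0 ∧ so.table.size = other.table.size ∧ other.fill = other.used then other
        else if so.fill = 0 then (other.table.toList.filterMap id).foldl pvInsertClean so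
        else (other.table.toList.filterMap id).foldl pvSetAdd so).used)
      ∧ (if so.fill = 0 ∧ so.table.size = other.table.size ∧ other.fill = other.used then other
         else if so.fill = 0 then (other.table.toList.filterMap id).foldl pvInsertClean so
         else (other.table.toList.filterMap id).foldl pvSetAdd so).fill =
        (if so.fill = 0 ∧ so.table.size = other.table.size ∧ other.fill = other.used then other
         else if so.fill = 0 then (other.table.toList.filterMap id).foldl pvInsertClean so
         else (other.table.toList.filterMap id).foldl pvSetAdd so).used := by
  subst hG
  by_cases hfast : so.used = 0 ∧ so.table.size = other.table.size
  · rw [if_pos hfast, if_pos (show so.fill = 0 ∧ so.table.size = other.table.size ∧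
        other.fill = other.used from ⟨by omega, hfast.2, ho⟩)]
    exact ⟨rfl, ho⟩
  · rw [if_neg hfast,
        if_neg (show ¬ (so.fill = 0 ∧ so.table.size = other.table.size ∧
          other.fill = other.used) from fun hA => hfast ⟨by omega, hA.2.1⟩)]
    by_cases hz : so.used = 0
    · rw [if_pos hz, if_pos (show so.fill = 0 by omega)]
      exact foldl_qPlace_eq _ so hGf
    · rw [if_neg hz, if_neg (show ¬ so.fill = 0 by omega)]
      exact foldl_qAdd_eq _ so hGf

theorem qMerge_eq (s other : pvPySet) (hs : s.fill = s.used) (ho : other.fill = other.used) :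
    qMerge (s.table, s.used) (other.table, other.used) =
      ((pvMerge s other).table, (pvMerge s other).used)
      ∧ (pvMerge s other).fill = (pvMerge s other).used := by
  simp only [qMerge, pvMerge]
  by_cases hc : (s.fill + other.used) * 5 ≥ (s.table.size - 1) * 3
  · rw [if_pos (show (s.used + other.used) * 5 ≥ (s.table.size - 1) * 3 by omega), if_pos hc]
    have hG := qRehash_eq s ((s.used + other.used) * 2)
    exact qMerge_eq_core (pvResize s ((s.used + other.used) * 2)) other
      (qRehash s.table ((s.used + other.used) * 2)) hG.1 hG.2 ho
  · rw [if_neg (show ¬ (s.used + other.used) * 5 ≥ (s.table.size - 1) * 3 by omega), if_neg hc]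
    exact qMerge_eq_core s other (s.table, s.used) rfl hs ho

theorem qUnionKeys_eq (k1 k2 : List Int) : qUnionKeys k1 k2 = pvSetUnionKeys k1 k2 := by
  have h0 : pvEmptySet.fill = pvEmptySet.used := rfl
  have hs1 := foldl_qAdd_eq k1 pvEmptySet h0
  have hs2 := foldl_qAdd_eq k2 pvEmptySet h0
  have hm1 := qMerge_eq pvEmptySet (k1.foldl pvSetAdd pvEmptySet) h0 hs1.2
  have hm2 := qMerge_eq (pvMerge pvEmptySet (k1.foldl pvSetAdd pvEmptySet))
    (k2.foldl pvSetAdd pvEmptySet) hm1.2 hs2.2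
  show PySem.Set.ofList (List.filterMap id
      (qMerge (qMerge ((Array.replicate 8 none : Array (Option Int)), (0 : Nat))
        (k1.foldl qAdd ((Array.replicate 8 none : Array (Option Int)), (0 : Nat))))
        (k2.foldl qAdd ((Array.replicate 8 none : Array (Option Int)), (0 : Nat)))).1.toList) =
    PySem.Set.ofList (List.filterMap id
      (pvMerge (pvMerge pvEmptySet (k1.foldl pvSetAdd pvEmptySet))
        (k2.foldl pvSetAdd pvEmptySet)).table.toList)
  rw [show ((Array.replicate 8 none : Array (Option Int)), (0 : Nat)) =
      (pvEmptySet.table, pvEmptySet.used) from rfl, hs1.1, hs2.1, hm1.1, hm2.1]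

-- negate every value: B keeps sources as positive remaining capacities, A as negative deltas
def pvNeg (l : List (Int × Int)) : List (Int × Int) := l.map (fun p => (p.1, -p.2))

theorem pvNeg_pvNeg (l : List (Int × Int)) : pvNeg (pvNeg l) = l := by
  simp [pvNeg, Function.comp_def]

theorem pvNeg_append (l m : List (Int × Int)) : pvNeg (l ++ m) = pvNeg l ++ pvNeg m := by
  simp [pvNeg]

theorem pv_map_replace (K R : List (Int × Int)) (src v w : Int)
    (hK : src ∉ K.map Prod.fst) (hR : src ∉ R.map Prod.fst) :
    (K ++ (src, v) :: R).map (fun p => if p.1 == src then (src, w) else p) =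
      K ++ (src, w) :: R := by
  have hid : ∀ (L : List (Int × Int)), src ∉ L.map Prod.fst →
      L.map (fun p => if p.1 == src then (src, w) else p) = L := by
    intro L hL
    rw [List.map_congr_left (g := id), List.map_id]
    intro p hp
    have : p.1 ≠ src := fun e => hL (List.mem_map.mpr ⟨p, hp, e⟩)
    simp [this]
  rw [List.map_append, List.map_cons, hid K hK, hid R hR]
  simp

theorem pv_filter_out (K R : List (Int × Int)) (src v : Int)
    (hK : src ∉ K.map Prod.fst) (hR : src ∉ R.map Prod.fst) :
    (K ++ (src, v) :: R).filter (fun p => !(p.1 == src)) = K ++ R := by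
  have hid : ∀ (L : List (Int × Int)), src ∉ L.map Prod.fst →
      L.filter (fun p => !(p.1 == src)) = L := by
    intro L hL
    rw [List.filter_eq_self]
    intro p hp
    have : p.1 ≠ src := fun e => hL (List.mem_map.mpr ⟨p, hp, e⟩)
    simp [this]
  simp [hid K hK, hid R hR]

theorem qDraw_stop (d need : Int) (stack back : List (Int × Int))
    (acc : List (List (String × Int))) (got : Int) (hg : got = need) :
    qDraw d need stack got back acc = (stack, back, acc) := by
  cases stack with
  | nil => rfl
  | cons p lower =>
    obtain ⟨c, r⟩ := p
    rw [qDraw, if_pos hg]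

theorem pv_inner_eq (dst needed : Int)
    (snap : List (Int × Int)) :
    ∀ (K : List (Int × Int)) (sources dests : PySem.Dict Int Int)
      (ops : List (List (String × Int))) (taken : Int),
    sources.items = K ++ snap →
    sources.keys.Nodup →
    (∀ p ∈ sources.items, p.2 < 0) →
    dests.getD dst 0 = needed - taken →
    needed - taken ≠ 0 →
    0 < needed →
    (pvInnerA dst needed snap ops sources dests).1 =
        (qDraw dst needed (pvNeg snap) taken (pvNeg K) ops).2.2 ∧
      (pvInnerA dst needed snap ops sources dests).2.1.items =
        pvNeg ((qDraw dst needed (pvNeg snap) taken (pvNeg K) ops).2.1 ++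
          (qDraw dst needed (pvNeg snap) taken (pvNeg K) ops).1) ∧
      (pvInnerA dst needed snap ops sources dests).2.1.keys.Nodup ∧
      (∀ p ∈ (pvInnerA dst needed snap ops sources dests).2.1.items, p.2 < 0) ∧
      (∀ d, d ≠ dst →
        (pvInnerA dst needed snap ops sources dests).2.2.getD d 0 = dests.getD d 0) := by
  induction snap with
  | nil =>
    intro K sources dests ops taken hitems hnodup hvals hd hcont hpos
    rw [show pvNeg ([] : List (Int × Int)) = [] from rfl]
    refine ⟨rfl, ?_, hnodup, hvals, fun d _ => rfl⟩
    show sources.items = pvNeg (pvNeg K ++ [])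
    rw [List.append_nil, pvNeg_pvNeg]
    simpa using hitems
  | cons hd_pair rest ih =>
    obtain ⟨src, avail⟩ := hd_pair
    intro K sources dests ops taken hitems hnodup hvals hd hcont hpos
    have hmem : (src, avail) ∈ sources.items := by rw [hitems]; simp
    have havail : avail < 0 := hvals _ hmem
    have hkeys : sources.keys = K.map Prod.fst ++ src :: rest.map Prod.fst := by
      simp [PySem.Dict.keys, hitems]
    have hnd : (K.map Prod.fst ++ src :: rest.map Prod.fst).Nodup := hkeys ▸ hnodup
    have hKsrc : src ∉ K.map Prod.fst :=
      fun h => (List.nodup_append.mp hnd).2.2 src h src (by simp) rfl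
    have hRsrc : src ∉ rest.map Prod.fst :=
      (List.nodup_cons.mp (List.nodup_append.mp hnd).2.1).1
    set r : Int := -avail with hr
    have hrpos : 0 < r := by omega
    set t : Int := min (-avail) needed with ht
    have htmin : t = min r needed := rfl
    have haB : (if needed < r then needed else r) = t := by rw [htmin]; omega
    have htpos : 0 < t := by rw [htmin]; omega
    have htler : t ≤ r := by rw [htmin]; omega
    have hnotle : ¬ (t ≤ 0) := by omega
    have hne : ¬ (taken = needed) := by omega
    have hgetsrc : sources.getD src 0 = avail :=
      PySem.Dict.getD_of_mem_items sources hmem hnodup 0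
    have hcontains : sources.contains src = true :=
      (PySem.Dict.contains_iff_mem_keys sources src).mpr (by rw [hkeys]; simp)
    have hmodify : (sources.modify src 0 (· + t)).items = K ++ (src, avail + t) :: rest := by
      simp only [PySem.Dict.modify, hgetsrc]
      rw [PySem.Dict.items_insert_of_contains sources _ hcontains, hitems]
      exact pv_map_replace K rest src avail (avail + t) hKsrc hRsrc
    have hmodkeys : (sources.modify src 0 (· + t)).keys = sources.keys := by
      simp only [PySem.Dict.modify]
      exact PySem.Dict.keys_insert_of_contains sources _ hcontains
    have hget1 : (sources.modify src 0 (· + t)).getD src 0 = avail + t := by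
      simp only [PySem.Dict.modify, hgetsrc]
      exact PySem.Dict.getD_insert_self sources src _ 0
    have hmodvals : ∀ p ∈ (sources.modify src 0 (· + t)).items, p.2 < 0 ∨ p = (src, avail + t) := by
      intro p hp
      rw [hmodify] at hp
      rcases List.mem_append.mp hp with h | h
      · exact Or.inl (hvals p (by rw [hitems]; exact List.mem_append.mpr (Or.inl h)))
      · rcases List.mem_cons.mp h with h | h
        · exact Or.inr h
        · exact Or.inl (hvals p (by rw [hitems]; simp [h]))
    have herase : ((sources.modify src 0 (· + t)).erase src).items = K ++ rest := by
      simp only [PySem.Dict.erase, hmodify]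
      exact pv_filter_out K rest src (avail + t) hKsrc hRsrc
    have herasend : (((sources.modify src 0 (· + t)).erase src).items.map Prod.fst).Nodup := by
      rw [herase]
      have hsub : List.Sublist ((K ++ rest).map Prod.fst)
          (K.map Prod.fst ++ src :: rest.map Prod.fst) := by
        rw [List.map_append]
        exact (List.sublist_cons_self _ _).append_left _
      exact hnd.sublist hsub
    have herasevals : ∀ p ∈ ((sources.modify src 0 (· + t)).erase src).items, p.2 < 0 := by
      intro p hp
      rw [herase] at hp
      rcases List.mem_append.mp hp with h | h
      · exact hvals p (by rw [hitems]; exact List.mem_append.mpr (Or.inl h))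
      · exact hvals p (by rw [hitems]; simp [h])
    have hdest1 : (dests.modify dst 0 (· - t)).getD dst 0 = needed - taken - t := by
      rw [PySem.Dict.getD_modify_self, hd]
    have hdestne : ∀ d, d ≠ dst → (dests.modify dst 0 (· - t)).getD d 0 = dests.getD d 0 :=
      fun d hne' => PySem.Dict.getD_modify_of_ne dests 0 _ hne'
    rw [show pvNeg ((src, avail) :: rest) = (src, r) :: pvNeg rest by simp [pvNeg, hr]]
    simp only [pvInnerA, qDraw, qOp, ← ht, haB, if_neg hnotle, if_neg hne, hget1, hdest1]
    by_cases hbreak : taken + t = needed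
    · have hz : needed - taken - t = 0 := by omega
      rw [if_pos hz, qDraw_stop _ _ _ _ _ _ hbreak]
      by_cases hkeep : t < r
      · have hne0 : ¬ (avail + t = 0) := by omega
        rw [if_pos hkeep, if_neg hne0]
        refine ⟨rfl, ?_, ?_, ?_, fun d hne' => hdestne d hne'⟩
        · rw [hmodify, pvNeg_append, pvNeg_append, pvNeg_pvNeg, pvNeg_pvNeg]
          simp only [pvNeg, List.map_cons, List.map_nil, List.append_assoc, List.cons_append,
            List.nil_append]
          have hv : avail + t = -(r - t) := by omega
          rw [hv]
        · rw [hmodkeys]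
          exact hnodup
        · intro p hp
          rcases hmodvals p hp with h | h
          · exact h
          · rw [h]; dsimp; omega
      · have he0 : avail + t = 0 := by omega
        rw [if_neg hkeep, if_pos he0]
        refine ⟨rfl, ?_, herasend, herasevals, fun d hne' => hdestne d hne'⟩
        rw [herase, pvNeg_append, pvNeg_pvNeg, pvNeg_pvNeg]
    · have hz : ¬ (needed - taken - t = 0) := by omega
      rw [if_neg hz]
      by_cases hkeep : t < r
      · have hne0 : ¬ (avail + t = 0) := by omega
        rw [if_pos hkeep, if_neg hne0]
        have hK' : pvNeg (K ++ [(src, avail + t)]) = pvNeg K ++ [(src, r - t)] := by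
          rw [pvNeg_append]
          simp only [pvNeg, List.map_cons, List.map_nil]
          congr 3
          omega
        have hrec := ih (K ++ [(src, avail + t)]) (sources.modify src 0 (· + t))
          (dests.modify dst 0 (· - t))
          (ops ++ [[("from", src), ("to", dst), ("amount", t)]]) (taken + t)
          (by rw [hmodify]; simp) (by rw [hmodkeys]; exact hnodup)
          (by
            intro p hp
            rcases hmodvals p hp with h | h
            · exact h
            · rw [h]; dsimp; omega)
          (by rw [hdest1]; ring) (by omega) hpos
        rw [hK'] at hrec
        exact ⟨hrec.1, hrec.2.1, hrec.2.2.1, hrec.2.2.2.1,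
          fun d hne' => (hrec.2.2.2.2 d hne').trans (hdestne d hne')⟩
      · have he0 : avail + t = 0 := by omega
        rw [if_neg hkeep, if_pos he0]
        have hrec := ih K ((sources.modify src 0 (· + t)).erase src)
          (dests.modify dst 0 (· - t))
          (ops ++ [[("from", src), ("to", dst), ("amount", t)]]) (taken + t)
          herase herasend herasevals
          (by rw [hdest1]; ring) (by omega) hpos
        exact ⟨hrec.1, hrec.2.1, hrec.2.2.1, hrec.2.2.2.1,
          fun d hne' => (hrec.2.2.2.2 d hne').trans (hdestne d hne')⟩

theorem pv_outer_eq (L : List (Int × Int)) :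
    ∀ (sources dests : PySem.Dict Int Int) (ops : List (List (String × Int)))
      (srcsB : List (Int × Int)),
    sources.items = pvNeg srcsB →
    sources.keys.Nodup →
    (∀ p ∈ sources.items, p.2 < 0) →
    (∀ p ∈ L, dests.getD p.1 0 = p.2 ∧ 0 < p.2) →
    (L.map Prod.fst).Nodup →
    (L.foldl (fun st dn => pvInnerA dn.1 dn.2 st.2.1.items st.1 st.2.1 st.2.2)
        ((ops, sources, dests) : List (List (String × Int)) × PySem.Dict Int Int × PySem.Dict Int Int)).1 =
      qServe L srcsB ops := by
  induction L with
  | nil => intro _ _ _ _ _ _ _ _ _; rfl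
  | cons hd_pair rest ih =>
    obtain ⟨dst, needed⟩ := hd_pair
    intro sources dests ops srcsB hitems hnodup hvals hL hLnd
    have hdn := hL (dst, needed) (by simp)
    have hpos : 0 < needed := hdn.2
    have hsnap : pvNeg sources.items = srcsB := by rw [hitems, pvNeg_pvNeg]
    have h := pv_inner_eq dst needed sources.items [] sources dests ops 0
      (by simp) hnodup hvals (by simpa using hdn.1) (by omega) hpos
    rw [show pvNeg ([] : List (Int × Int)) = [] from rfl, hsnap] at h
    obtain ⟨hops, hsrc, hnd', hvals', hdest'⟩ := h
    simp only [List.foldl_cons, qServe]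
    rcases hq : qDraw dst needed srcsB 0 [] ops with ⟨lower, back, acc⟩
    rw [hq] at hops hsrc
    dsimp only at hops hsrc
    have hLnd' : (dst :: rest.map Prod.fst).Nodup := by
      rw [List.map_cons] at hLnd
      exact hLnd
    have hrest : ∀ p ∈ rest,
        (pvInnerA dst needed sources.items ops sources dests).2.2.getD p.1 0 = p.2 ∧ 0 < p.2 := by
      intro p hp
      have hp' := hL p (by simp [hp])
      have hne : p.1 ≠ dst := by
        intro e
        exact (List.nodup_cons.mp hLnd').1 (e ▸ List.mem_map.mpr ⟨p, hp, rfl⟩)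
      exact ⟨(hdest' p.1 hne).trans hp'.1, hp'.2⟩
    have ihx := ih (pvInnerA dst needed sources.items ops sources dests).2.1
      (pvInnerA dst needed sources.items ops sources dests).2.2
      (pvInnerA dst needed sources.items ops sources dests).1
      (back ++ lower)
      hsrc hnd' hvals' hrest (List.nodup_cons.mp hLnd').2
    show (List.foldl (fun st dn => pvInnerA dn.1 dn.2 st.2.1.items st.1 st.2.1 st.2.2)
        ((pvInnerA dst needed sources.items ops sources dests).1,
         (pvInnerA dst needed sources.items ops sources dests).2.1,
         (pvInnerA dst needed sources.items ops sources dests).2.2) rest).1 =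
      qServe rest (back ++ lower) acc
    rw [← hops]
    exact ihx

theorem pv_items_filter_insert (P : Int → Prop) [DecidablePred P] :
    ∀ (l : List (Int × Int)) (d : PySem.Dict Int Int),
    d.keys.Nodup →
    (∀ p ∈ l, d.contains p.1 = false) →
    (l.map Prod.fst).Nodup →
    ((l.foldl (fun d p => if P p.2 then d.insert p.1 p.2 else d) d).items =
      d.items ++ l.filter (fun p => decide (P p.2))) ∧
    (l.foldl (fun d p => if P p.2 then d.insert p.1 p.2 else d) d).keys.Nodup := by
  intro l
  induction l with
  | nil => intro d hnd _ _; exact ⟨by simp, hnd⟩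
  | cons p rest ih =>
    intro d hnd hfresh hlnd
    have hpfresh : d.contains p.1 = false := hfresh p (by simp)
    have hrestnd : (rest.map Prod.fst).Nodup := (List.nodup_cons.mp (by simpa using hlnd)).2
    have hpnotrest : p.1 ∉ rest.map Prod.fst := (List.nodup_cons.mp (by simpa using hlnd)).1
    by_cases hP : P p.2
    · have hins : (d.insert p.1 p.2).items = d.items ++ [(p.1, p.2)] :=
        PySem.Dict.items_insert_of_not_contains d p.2 hpfresh
      have hinsnd : (d.insert p.1 p.2).keys.Nodup := PySem.Dict.nodup_keys_insert d p.1 p.2 hnd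
      have hfresh' : ∀ q ∈ rest, (d.insert p.1 p.2).contains q.1 = false := by
        intro q hq
        rw [PySem.Dict.contains_insert]
        have h1 : (q.1 == p.1) = false := by
          simp only [beq_eq_false_iff_ne]
          exact fun e => hpnotrest (e ▸ List.mem_map.mpr ⟨q, hq, rfl⟩)
        rw [h1, hfresh q (by simp [hq])]
        rfl
      have := ih (d.insert p.1 p.2) hinsnd hfresh' hrestnd
      refine ⟨?_, ?_⟩
      · simp only [List.foldl_cons, if_pos hP]
        rw [this.1, hins, List.filter_cons, if_pos (by simpa using hP)]
        simp
      · simp only [List.foldl_cons, if_pos hP]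
        exact this.2
    · have := ih d hnd (fun q hq => hfresh q (by simp [hq])) hrestnd
      refine ⟨?_, ?_⟩
      · simp only [List.foldl_cons, if_neg hP]
        rw [this.1, List.filter_cons, if_neg (by simpa using hP)]
      · simp only [List.foldl_cons, if_neg hP]
        exact this.2

theorem qSplit_spec (cur opt : PySem.Dict Int Int) :
    ∀ (u : List Int) (ps : qPools),
    (qSplit cur opt u ps).stack = ps.stack ++
      pvNeg ((u.map (fun c => (c, opt.getD c 0 - cur.getD c 0))).filter (fun p => decide (p.2 < 0))) ∧
    (qSplit cur opt u ps).dsts = ps.dsts ++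
      (u.map (fun c => (c, opt.getD c 0 - cur.getD c 0))).filter (fun p => decide (0 < p.2)) := by
  intro u
  induction u with
  | nil => intro ps; simp [qSplit, pvNeg]
  | cons c cs ih =>
    intro ps
    simp only [qSplit, List.map_cons, List.filter_cons]
    by_cases h1 : opt.getD c 0 - cur.getD c 0 < 0
    · have h2 : ¬ (0 < opt.getD c 0 - cur.getD c 0) := by omega
      rw [if_pos h1]
      have hrec := ih { ps with stack := ps.stack ++ [(c, -(opt.getD c 0 - cur.getD c 0))] }
      constructor
      · rw [hrec.1]
        simp [pvNeg, h1, h2] <;> omega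
      · rw [hrec.2]
        simp [h1, h2] <;> omega
    · rw [if_neg h1]
      by_cases h3 : 0 < opt.getD c 0 - cur.getD c 0
      · rw [if_pos h3]
        have hrec := ih { ps with dsts := ps.dsts ++ [(c, opt.getD c 0 - cur.getD c 0)] }
        constructor
        · rw [hrec.1]
          simp [pvNeg, h1, h3] <;> omega
        · rw [hrec.2]
          simp [h1, h3] <;> omega
      · rw [if_neg h3]
        have hrec := ih ps
        constructor
        · rw [hrec.1]
          simp [pvNeg, h1, h3] <;> omega
        · rw [hrec.2]
          simp [h1, h3] <;> omega

theorem pvSetUnionKeys_nodup (k1 k2 : List Int) : (pvSetUnionKeys k1 k2).Nodup := by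
  unfold pvSetUnionKeys
  exact PySem.Set.nodup_ofList _

theorem pv_main (cur opt : PySem.Dict Int Int) (u : List Int) (hund : u.Nodup) :
    (let delta : PySem.Dict Int Int :=
        u.foldl (fun d cid => d.insert cid (opt.getD cid 0 - cur.getD cid 0)) PySem.Dict.empty
     let sources := delta.items.foldl
        (fun d p => if p.2 < 0 then d.insert p.1 p.2 else d) (PySem.Dict.empty : PySem.Dict Int Int)
     let destinations := delta.items.foldl
        (fun d p => if 0 < p.2 then d.insert p.1 p.2 else d) (PySem.Dict.empty : PySem.Dict Int Int)
     (destinations.items.foldl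
        (fun st dn => pvInnerA dn.1 dn.2 st.2.1.items st.1 st.2.1 st.2.2)
        (([], sources, destinations) : List (List (String × Int)) × PySem.Dict Int Int × PySem.Dict Int Int)).1) =
    qServe (qSplit cur opt u ⟨[], []⟩).dsts (qSplit cur opt u ⟨[], []⟩).stack [] := by
  simp only []
  have hdelta : (u.foldl (fun d cid => d.insert cid (opt.getD cid 0 - cur.getD cid 0))
      (PySem.Dict.empty : PySem.Dict Int Int)).items =
      u.map (fun cid => (cid, opt.getD cid 0 - cur.getD cid 0)) := by
    have := PySem.Dict.items_foldl_insert_fresh u (fun a => a)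
      (fun cid => opt.getD cid 0 - cur.getD cid 0) PySem.Dict.empty
      (fun a _ => PySem.Dict.contains_empty a) (by simpa using hund)
    simpa using this
  have hdfstnd : ((u.map (fun cid => (cid, opt.getD cid 0 - cur.getD cid 0))).map Prod.fst).Nodup := by
    simpa [Function.comp_def] using hund
  have hemptynd : (PySem.Dict.empty : PySem.Dict Int Int).keys.Nodup := by
    simp [PySem.Dict.keys, PySem.Dict.empty]
  have hS := pv_items_filter_insert (fun x => x < 0)
    (u.map (fun cid => (cid, opt.getD cid 0 - cur.getD cid 0)))
    PySem.Dict.empty hemptynd (fun p _ => PySem.Dict.contains_empty p.1) hdfstnd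
  have hD := pv_items_filter_insert (fun x => 0 < x)
    (u.map (fun cid => (cid, opt.getD cid 0 - cur.getD cid 0)))
    PySem.Dict.empty hemptynd (fun p _ => PySem.Dict.contains_empty p.1) hdfstnd
  rw [hdelta]
  have hSitems : ((u.map (fun cid => (cid, opt.getD cid 0 - cur.getD cid 0))).foldl
      (fun d p => if p.2 < 0 then d.insert p.1 p.2 else d)
      (PySem.Dict.empty : PySem.Dict Int Int)).items =
      (u.map (fun cid => (cid, opt.getD cid 0 - cur.getD cid 0))).filter
        (fun p => decide (p.2 < 0)) := by
    rw [hS.1]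
    simp [PySem.Dict.empty]
  have hDitems : ((u.map (fun cid => (cid, opt.getD cid 0 - cur.getD cid 0))).foldl
      (fun d p => if 0 < p.2 then d.insert p.1 p.2 else d)
      (PySem.Dict.empty : PySem.Dict Int Int)).items =
      (u.map (fun cid => (cid, opt.getD cid 0 - cur.getD cid 0))).filter
        (fun p => decide (0 < p.2)) := by
    rw [hD.1]
    simp [PySem.Dict.empty]
  have hspl := qSplit_spec cur opt u ⟨[], []⟩
  rw [hspl.1, hspl.2, hDitems]
  simp only [List.nil_append]
  refine pv_outer_eq
    ((u.map (fun cid => (cid, opt.getD cid 0 - cur.getD cid 0))).filter (fun p => decide (0 < p.2)))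
    _ _ []
    (pvNeg ((u.map (fun cid => (cid, opt.getD cid 0 - cur.getD cid 0))).filter
      (fun p => decide (p.2 < 0)))) ?_ hS.2 ?_ ?_ ?_
  · rw [pvNeg_pvNeg]
    exact hSitems
  · intro p hp
    rw [hSitems] at hp
    have := List.of_mem_filter hp
    simpa using this
  · intro p hp
    have hmem : (p.1, p.2) ∈ ((u.map (fun cid => (cid, opt.getD cid 0 - cur.getD cid 0))).foldl
        (fun d p => if 0 < p.2 then d.insert p.1 p.2 else d)
        (PySem.Dict.empty : PySem.Dict Int Int)).items := by
      rw [hDitems]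
      simpa using hp
    refine ⟨PySem.Dict.getD_of_mem_items _ hmem hD.2 0, ?_⟩
    have := List.of_mem_filter hp
    simpa using this
  · have hsub : List.Sublist (((u.map (fun cid => (cid, opt.getD cid 0 - cur.getD cid 0))).filter
        (fun p => decide (0 < p.2))).map Prod.fst)
        ((u.map (fun cid => (cid, opt.getD cid 0 - cur.getD cid 0))).map Prod.fst) :=
      List.filter_sublist.map Prod.fst
    exact hdfstnd.sublist hsub

-- ===== VERDICT (by name: the statement is the Claim_ definition above) =====
theorem compute_rebalance_operations_spec : Claim_equal_compute_rebalance_operations := by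
  intro cur opt _
  show compute_rebalance_operations cur opt = compute_rebalance_operations_alt cur opt
  simp only [compute_rebalance_operations, compute_rebalance_operations_alt, qUnionKeys_eq]
  exact pv_main _ _ _ (pvSetUnionKeys_nodup _ _)
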